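-- pv_equiv track=rewrite | github.com/CJKinni/advent-of-code | 2023/13/main.py | find_vertical_reflection
-- ===== SOURCE A (Python) =====
-- def find_vertical_reflection(pattern, desired_reflection_count=0):
--     rows = len(pattern)
--     cols = len(pattern[0])
--
--     for col in range(cols - 1):  # Check between each pair of columns
--         max_elements_to_check = min(col + 1, cols - col - 1)
--
--         exception_count = 0
--         for row in range(rows):
--             if not all(pattern[row][col - i] == pattern[row][col + i + 1] for i in range(max_elements_to_check)):
--                 exception_count += 1
--                 if exception_count > desired_reflection_count:
--                     break
--
--         if exception_count == desired_reflection_count: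
--             return col
--
--     return None
-- ===== SOURCE B (Python) =====
-- def find_vertical_reflection(pattern, desired_reflection_count=0):
--     rows = len(pattern)
--     cols = len(pattern[0])
--     # transpose once: one string per column
--     columns = ["".join(row[c] for row in pattern) for c in range(cols)]
--     for col in range(cols - 1):
--         # mirrored column pairs around the split; zip truncates to the shorter side,
--         # and pairs of identical columns can never mark a row as mismatched
--         pairs = [(a, b) for a, b in zip(columns[:col + 1][::-1], columns[col + 1:]) if a != b]
--         bad = sum(1 for r in range(rows) if any(a[r] != b[r] for a, b in pairs))
--         if bad == desired_reflection_count: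
--             return col
--     return None
-- ===== Notes on version B (the rewrite author's own statement) =====
-- stated objective: alternative
-- what changed: B transposes the grid into column strings once and, for each split, counts mismatched rows by scanning only the mirrored column pairs that differ as whole strings, with no mutable counter and no break logic; A scans each row character-by-character around every split with early-exit counters.
-- outside the precondition, e.g. on find_vertical_reflection(['ab', 'a'], 0): A returns None, B raises IndexError
import Mathlib
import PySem

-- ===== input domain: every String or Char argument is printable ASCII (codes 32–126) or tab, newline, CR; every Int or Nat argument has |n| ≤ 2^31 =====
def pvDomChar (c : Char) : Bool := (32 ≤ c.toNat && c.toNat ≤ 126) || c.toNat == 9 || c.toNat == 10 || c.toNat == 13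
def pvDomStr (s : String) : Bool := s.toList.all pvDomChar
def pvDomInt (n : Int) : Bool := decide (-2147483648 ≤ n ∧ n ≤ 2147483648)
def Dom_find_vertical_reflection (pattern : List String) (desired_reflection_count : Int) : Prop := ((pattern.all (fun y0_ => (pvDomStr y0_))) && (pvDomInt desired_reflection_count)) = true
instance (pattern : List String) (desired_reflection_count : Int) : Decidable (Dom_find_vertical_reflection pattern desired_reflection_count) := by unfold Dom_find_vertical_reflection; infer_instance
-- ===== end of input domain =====

-- B transposes the grid once into column lists and counts mismatched rows over the differing
-- mirrored column pairs of each split (no mutable counter, no break logic); same results as A.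

-- ===== PORT A =====
-- `all(pattern[row][col - i] == pattern[row][col + i + 1] for i in range(max_elements_to_check))`
def aRowAll (s : List Char) (col m : Nat) : Bool :=
  (List.range m).all (fun i => s.getD (col - i) ' ' == s.getD (col + i + 1) ' ')

-- the `for row in range(rows)` loop with `exception_count` and its early `break`
def aRowLoop (col m : Nat) (d : Int) : List (List Char) → Int → Int
  | [], c => c
  | s :: rest, c =>
    if !(aRowAll s col m) then
      if c + 1 > d then c + 1 else aRowLoop col m d rest (c + 1)
    else aRowLoop col m d rest c

-- the `for col in range(cols - 1)` loop
def aColLoop (pat : List (List Char)) (cols : Nat) (d : Int) : List Nat → Option Int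
  | [] => none
  | col :: rest =>
    let m := min (col + 1) (cols - col - 1)
    if aRowLoop col m d pat 0 = d then some (col : Int)
    else aColLoop pat cols d rest

def find_vertical_reflection (pattern : List String) (desired_reflection_count : Int) : Option Int :=
  let pat := pattern.map String.toList
  let cols := (pattern.headD "").length
  aColLoop pat cols desired_reflection_count (List.range (cols - 1))

-- ===== PORT B =====
-- `sum(1 for r in range(rows) if any(a[r] != b[r] for a, b in pairs))` for one split
def bBad (columns : List (List Char)) (rows col : Nat) : Nat :=
  let pairs := (((columns.take (col + 1)).reverse).zip (columns.drop (col + 1))).filter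
    (fun p => p.1 ≠ p.2)
  (List.range rows).countP (fun r => pairs.any (fun p => p.1.getD r ' ' != p.2.getD r ' '))

def bColLoop (columns : List (List Char)) (rows : Nat) (d : Int) : List Nat → Option Int
  | [] => none
  | col :: rest =>
    if (bBad columns rows col : Int) = d then some (col : Int)
    else bColLoop columns rows d rest

def find_vertical_reflection_alt (pattern : List String) (desired_reflection_count : Int) : Option Int :=
  let rows := pattern.length
  let cols := (pattern.headD "").length
  let columns : List (List Char) :=
    (List.range cols).map (fun c => pattern.map (fun row => row.toList.getD c ' '))
  bColLoop columns rows desired_reflection_count (List.range (cols - 1))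

-- ===== PRECONDITION & SPEC =====
-- Pre_ excludes the empty pattern (A raises IndexError on pattern[0]) and ragged patterns with a
-- row shorter than the first row, where A raises IndexError or, depending on lazy short-circuit
-- order, returns while B's transposition raises IndexError.
def Pre_find_vertical_reflection (pattern : List String) (desired_reflection_count : Int) : Prop :=
  pattern ≠ [] ∧ ∀ s ∈ pattern, (pattern.headD "").length ≤ s.length

instance (pattern : List String) (desired_reflection_count : Int) : Decidable (Pre_find_vertical_reflection pattern desired_reflection_count) := by unfold Pre_find_vertical_reflection; infer_instance

def pvWitness_find_vertical_reflection : List String × Int := (["#.##.", "#.##.", "..#.#"], 0)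

def Spec_find_vertical_reflection (pattern : List String) (desired_reflection_count : Int) (out : Option Int) : Prop := out = find_vertical_reflection_alt pattern desired_reflection_count
instance (pattern : List String) (desired_reflection_count : Int) (out : Option Int) : Decidable (Spec_find_vertical_reflection pattern desired_reflection_count out) := by unfold Spec_find_vertical_reflection; infer_instance

-- ===== CLAIM (what is proved, stated in full; the proofs are below) =====
def Claim_equal_find_vertical_reflection : Prop := ∀ (pattern : List String) (desired_reflection_count : Int), Dom_find_vertical_reflection pattern desired_reflection_count → Pre_find_vertical_reflection pattern desired_reflection_count → Spec_find_vertical_reflection pattern desired_reflection_count (find_vertical_reflection pattern desired_reflection_count)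

-- ===== LEMMAS AND PROOFS =====

-- A's breaky row loop decides exactly "full mismatch count = d".
theorem aRowLoop_eq_d_iff (col m : Nat) (d : Int) :
    ∀ (l : List (List Char)) (c : Int),
      (aRowLoop col m d l c = d) ↔ (c + (l.countP (fun s => !aRowAll s col m) : Int) = d) := by
  intro l
  induction l with
  | nil => intro c; simp [aRowLoop]
  | cons s rest ih =>
    intro c
    by_cases hmis : aRowAll s col m
    · simp [aRowLoop, hmis, ih]
    · have hc : (List.countP (fun s => !aRowAll s col m) (s :: rest) : Int)
          = (rest.countP (fun s => !aRowAll s col m) : Int) + 1 := by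
        simp [hmis]
      by_cases hbr : c + 1 > d
      · have h1 : aRowLoop col m d (s :: rest) c = c + 1 := by
          simp [aRowLoop, hmis, hbr]
        constructor
        · intro h; omega
        · intro h
          have := Int.natCast_nonneg (rest.countP (fun s => !aRowAll s col m))
          omega
      · have h1 : aRowLoop col m d (s :: rest) c = aRowLoop col m d rest (c + 1) := by
          simp [aRowLoop, hmis, hbr]
        rw [h1, ih, hc]; constructor <;> intro h <;> omega

-- countP over `range l.length` of a pointwise-equal predicate equals countP over l.
theorem countP_range_eq {α : Type} (dflt : α) (P : α → Bool) :
    ∀ (l : List α) (Q : Nat → Bool),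
      (∀ r, r < l.length → Q r = P (l.getD r dflt)) →
      (List.range l.length).countP Q = l.countP P := by
  intro l
  induction l using List.reverseRecOn with
  | nil => intro Q h; simp
  | append_singleton l x ih =>
    intro Q h
    have hlen : (l ++ [x]).length = l.length + 1 := by simp
    rw [hlen, List.range_succ, List.countP_append, List.countP_append]
    have h1 : (List.range l.length).countP Q = l.countP P := by
      apply ih
      intro r hr
      have := h r (by simp; omega)
      rwa [List.getD_append _ _ _ _ hr] at this
    have h2 : Q l.length = P x := by
      have := h l.length (by simp)
      simpa using this
    simp [h1, h2, List.countP_cons]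

-- Transposed access: columns[c][r] = pattern[r][c] (getD form, rows in range).
theorem columns_getD (pattern : List String) (cols c r : Nat)
    (hc : c < cols) (hr : r < pattern.length) :
    (((List.range cols).map (fun c => pattern.map (fun row => row.toList.getD c ' '))).getD c []).getD r ' '
      = ((pattern.map String.toList).getD r []).getD c ' ' := by
  have h1 : ((List.range cols).map (fun c => pattern.map (fun row => row.toList.getD c ' '))).getD c []
      = pattern.map (fun row => row.toList.getD c ' ') := by
    rw [List.getD_eq_getElem?_getD]
    simp [hc]
  rw [h1]
  rw [List.getD_eq_getElem?_getD, List.getD_eq_getElem?_getD]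
  simp [List.getElem?_eq_getElem hr]

-- the i-th mirrored pair of B's zip is (columns[col-i], columns[col+1+i])
theorem zip_pair (columns : List (List Char)) (col i : Nat)
    (hcol : col + 1 ≤ columns.length)
    (hi : i < min (col + 1) (columns.length - (col + 1))) :
    ∀ (h : i < (((columns.take (col + 1)).reverse).zip (columns.drop (col + 1))).length),
    (((columns.take (col + 1)).reverse).zip (columns.drop (col + 1)))[i]'h
      = (columns.getD (col - i) [], columns.getD (col + i + 1) []) := by
  intro h
  rw [List.getElem_zip]
  have htake : (columns.take (col + 1)).length = col + 1 := by simp; omega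
  congr 1
  · simp only [List.getElem_reverse, List.getElem_take, htake]
    rw [List.getD_eq_getElem?_getD,
        List.getElem?_eq_getElem (show col - i < columns.length by omega)]
    simp only [Option.getD_some, Nat.add_sub_cancel]
  · rw [List.getElem_drop]
    rw [List.getD_eq_getElem?_getD,
        List.getElem?_eq_getElem (show col + i + 1 < columns.length by omega)]
    simp only [Option.getD_some]
    try (congr 1; omega)

-- B's per-split count equals A's full mismatch count (under Pre_'s shape facts).
theorem bBad_eq (pattern : List String) (col : Nat)
    (hcol : col < (pattern.headD "").length - 1) :
    (bBad ((List.range (pattern.headD "").length).map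
        (fun c => pattern.map (fun row => row.toList.getD c ' ')))
      pattern.length col : Nat)
      = (pattern.map String.toList).countP
          (fun s => !aRowAll s col (min (col + 1) ((pattern.headD "").length - col - 1))) := by
  set cols := (pattern.headD "").length with hcolsdef
  set columns := (List.range cols).map (fun c => pattern.map (fun row => row.toList.getD c ' ')) with hcolsarr
  have hlencols : columns.length = cols := by simp [hcolsarr]
  set m := min (col + 1) (cols - col - 1) with hm
  have hmcol : m ≤ col + 1 := by omega
  have hmcols : col + m < cols := by omega
  -- length facts for take/reverse/drop/zip
  have htake : (columns.take (col + 1)).length = col + 1 := by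
    simp [hlencols]; omega
  have hdrop : (columns.drop (col + 1)).length = cols - (col + 1) := by simp [hlencols]
  have hzlen : (((columns.take (col + 1)).reverse).zip (columns.drop (col + 1))).length = m := by
    simp [htake, hdrop]; omega
  unfold bBad
  -- rows side: countP over range pattern.length vs countP over pat
  rw [show pattern.length = (pattern.map String.toList).length by simp]
  apply countP_range_eq ([] : List Char)
  intro r hr
  simp only [List.length_map] at hr
  -- both sides are Bools: prove iff of their truth
  apply Bool.coe_iff_coe.mp
  rw [List.any_eq_true]
  constructor
  · rintro ⟨p, hpmem, hpne⟩
    have hpmem' := List.mem_of_mem_filter hpmem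
    -- p is the i-th zip pair for some i < m
    obtain ⟨i, hi, hpi⟩ := List.getElem_of_mem hpmem'
    rw [hzlen] at hi
    have hpair := zip_pair columns col i (by omega) (by omega) (by rw [hzlen]; exact hi)
    rw [hpair] at hpi
    have hp1 : p.1 = columns.getD (col - i) [] := by rw [← hpi]
    have hp2 : p.2 = columns.getD (col + i + 1) [] := by rw [← hpi]
    -- so the char inequality transfers to the row
    rw [hp1, hp2] at hpne
    rw [hcolsarr] at hpne
    rw [columns_getD pattern cols (col - i) r (by omega) hr] at hpne
    rw [columns_getD pattern cols (col + i + 1) r (by omega) hr] at hpne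
    rw [bne_iff_ne] at hpne
    rw [Bool.not_eq_true']
    unfold aRowAll
    rw [List.all_eq_false]
    exact ⟨i, List.mem_range.mpr hi, by simpa [beq_eq_false_iff_ne] using hpne⟩
  · intro hnot
    rw [Bool.not_eq_true'] at hnot
    unfold aRowAll at hnot
    rw [List.all_eq_false] at hnot
    obtain ⟨i, hi, hne⟩ := hnot
    rw [List.mem_range] at hi
    rw [Bool.not_eq_true, beq_eq_false_iff_ne] at hne
    refine ⟨(columns.getD (col - i) [], columns.getD (col + i + 1) []), ?_, ?_⟩
    · rw [List.mem_filter]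
      refine ⟨?_, ?_⟩
      · rw [← zip_pair columns col i (by omega) (by omega) (by rw [hzlen]; exact hi)]
        exact List.getElem_mem _
      · simp only [decide_eq_true_eq]
        intro habs
        apply hne
        rw [hcolsarr] at habs
        have e1 := columns_getD pattern cols (col - i) r (by omega) hr
        have e2 := columns_getD pattern cols (col + i + 1) r (by omega) hr
        rw [← e1, ← e2, habs]
    · rw [bne_iff_ne]
      rw [hcolsarr]
      rw [columns_getD pattern cols (col - i) r (by omega) hr,
          columns_getD pattern cols (col + i + 1) r (by omega) hr]
      exact hne

-- the two col loops agree when their conditions agree on every visited col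
theorem colLoops_eq (pat : List (List Char)) (columns : List (List Char)) (cols rows : Nat) (d : Int) :
    ∀ (L : List Nat),
      (∀ col ∈ L, (aRowLoop col (min (col + 1) (cols - col - 1)) d pat 0 = d) ↔
        ((bBad columns rows col : Int) = d)) →
      aColLoop pat cols d L = bColLoop columns rows d L := by
  intro L
  induction L with
  | nil => intro _; simp [aColLoop, bColLoop]
  | cons col rest ih =>
    intro h
    have hcond := h col (by simp)
    simp only [aColLoop, bColLoop]
    by_cases hc : aRowLoop col (min (col + 1) (cols - col - 1)) d pat 0 = d
    · rw [if_pos hc, if_pos (hcond.mp hc)]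
    · rw [if_neg hc, if_neg (fun hb => hc (hcond.mpr hb))]
      exact ih (fun c hcm => h c (by simp [hcm]))

-- ===== VERDICT (by name: the statement is the Claim_ definition above) =====
theorem find_vertical_reflection_spec : Claim_equal_find_vertical_reflection := by
  intro pattern d _hdom _hpre
  unfold Spec_find_vertical_reflection find_vertical_reflection find_vertical_reflection_alt
  apply colLoops_eq
  intro col hcolmem
  rw [List.mem_range] at hcolmem
  rw [aRowLoop_eq_d_iff]
  rw [bBad_eq pattern col hcolmem]
  omega
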